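-- pv_equiv track=rewrite | github.com/Christopher-Cannon/python-docs | Example code/extra/03 - hard/07 - coordinates.py | update_list
-- ===== SOURCE A (Python) =====
-- def update_list(lst, new_x, new_y):
--     # List has less than 7 elements
--     if(len(lst) < 7):
--         lst.append([new_x, new_y])
--     else:
--         # Shift each element to the left before adding the new coords
--         for x in range(len(lst) - 1):
--             lst[x] = lst[x + 1]
--
--         lst[-1] = [new_x, new_y]
--
--     return lst
-- ===== SOURCE B (Python) =====
-- def update_list(lst, new_x, new_y):
--     # Append unconditionally, then trim the oldest entry if we exceeded the window.
--     lst.append([new_x, new_y])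
--     if len(lst) > 7:
--         del lst[0]
--     return lst
-- ===== Notes on version B (the rewrite author's own statement) =====
-- stated objective: simpler
-- what changed: Replaces A's size-branch with an element-by-element shift loop by a single unconditional append followed by trimming the oldest element when the list exceeds 7; same in-place mutation of lst.
import Mathlib
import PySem

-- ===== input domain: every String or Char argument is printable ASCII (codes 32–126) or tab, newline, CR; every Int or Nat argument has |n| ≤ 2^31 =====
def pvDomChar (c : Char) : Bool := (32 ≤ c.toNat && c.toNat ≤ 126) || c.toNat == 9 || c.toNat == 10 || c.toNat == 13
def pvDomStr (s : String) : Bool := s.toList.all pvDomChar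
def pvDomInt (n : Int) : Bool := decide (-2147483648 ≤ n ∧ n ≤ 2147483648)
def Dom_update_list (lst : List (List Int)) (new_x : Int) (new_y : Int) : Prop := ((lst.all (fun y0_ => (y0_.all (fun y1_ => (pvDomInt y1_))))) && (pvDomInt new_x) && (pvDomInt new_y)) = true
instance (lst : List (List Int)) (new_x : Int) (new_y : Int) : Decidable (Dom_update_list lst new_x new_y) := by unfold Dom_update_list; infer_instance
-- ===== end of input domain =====

-- B replaces A's branch-plus-shift-loop by append-then-trim (same in-place mutation of lst; the proved equivalence is about the returned value).

-- ===== PORT A =====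
def update_list (lst : List (List Int)) (new_x : Int) (new_y : Int) : List (List Int) :=
  if lst.length < 7 then
    lst ++ [[new_x, new_y]]
  else
    -- for x in range(len(lst) - 1): lst[x] = lst[x + 1]   (indices are always in range here)
    let l := (PySem.List.pyRange 0 ((lst.length : Int) - 1) 1).foldl
      (fun l i => l.set i.toNat (l.getD (i.toNat + 1) [])) lst
    -- lst[-1] = [new_x, new_y]
    l.set (l.length - 1) [new_x, new_y]

-- ===== PORT B =====
def update_list_alt (lst : List (List Int)) (new_x : Int) (new_y : Int) : List (List Int) :=
  let l := lst ++ [[new_x, new_y]]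
  if l.length > 7 then l.drop 1 else l

-- ===== PRECONDITION & SPEC =====
def Spec_update_list (lst : List (List Int)) (new_x : Int) (new_y : Int) (out : List (List Int)) : Prop := out = update_list_alt lst new_x new_y
instance (lst : List (List Int)) (new_x : Int) (new_y : Int) (out : List (List Int)) : Decidable (Spec_update_list lst new_x new_y out) := by unfold Spec_update_list; infer_instance

-- ===== CLAIM (what is proved, stated in full; the proofs are below) =====
def Claim_equal_update_list : Prop := ∀ (lst : List (List Int)) (new_x : Int) (new_y : Int), Dom_update_list lst new_x new_y → Spec_update_list lst new_x new_y (update_list lst new_x new_y)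

-- ===== LEMMAS AND PROOFS =====

/-- One shift step, over Nat indices. -/
def pvShiftStep (l : List (List Int)) (j : Nat) : List (List Int) :=
  l.set j (l.getD (j + 1) [])

/-- A's Int-indexed fold over `pyRange` is the Nat-indexed fold over `List.range`. -/
lemma pvShift_range (lst : List (List Int)) :
    (PySem.List.pyRange 0 ((lst.length : Int) - 1) 1).foldl
      (fun l i => l.set i.toNat (l.getD (i.toNat + 1) [])) lst
    = (List.range (lst.length - 1)).foldl pvShiftStep lst := by
  rw [PySem.List.pyRange_one, List.foldl_map]
  have h : ((lst.length : Int) - 1 - 0).toNat = lst.length - 1 := by omega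
  rw [h]
  congr 1
  funext l j
  simp [pvShiftStep]

/-- Loop invariant: after the first `k` shift steps the list is
    `(lst.drop 1).take k ++ lst.drop k`. -/
lemma pvShift_inv (lst : List (List Int)) (k : Nat) (hk : k < lst.length) :
    (List.range k).foldl pvShiftStep lst = (lst.drop 1).take k ++ lst.drop k := by
  induction k with
  | zero => simp
  | succ k ih =>
    have hk' : k < lst.length := Nat.lt_of_succ_lt hk
    rw [List.range_succ, List.foldl_append, ih hk']
    simp only [List.foldl_cons, List.foldl_nil, pvShiftStep]
    have hlenA : ((lst.drop 1).take k).length = k := by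
      simp; omega
    have hdropk : lst.drop k = lst[k] :: lst.drop (k + 1) :=
      List.drop_eq_getElem_cons hk'
    have hget : ((lst.drop 1).take k ++ lst.drop k).getD (k + 1) [] = lst.getD (k + 1) [] := by
      rw [List.getD_eq_getElem?_getD, List.getD_eq_getElem?_getD,
          List.getElem?_append_right (by rw [hlenA]; omega), hlenA, List.getElem?_drop]
      congr 2
      omega
    rw [hget]
    rw [List.set_append_right _ _ (by omega), hlenA]
    have : k - k = 0 := by omega
    rw [this, hdropk]
    simp only [List.set_cons_zero]
    -- RHS: (lst.drop 1).take (k+1) ++ lst.drop (k+1)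
    have htake : (lst.drop 1).take (k + 1) = (lst.drop 1).take k ++ [lst.getD (k + 1) []] := by
      rcases Nat.lt_or_ge (k + 1) lst.length with h1 | h1
      · have hk1 : k < (lst.drop 1).length := by simp; omega
        rw [List.take_succ, List.getElem?_eq_getElem hk1]
        simp [List.getD, List.getElem?_eq_getElem h1]
      · -- then k + 1 = lst.length, so lst.drop 1 has length k: both sides hit the end
        have hlen1 : (lst.drop 1).length = k := by simp; omega
        have : (lst.drop 1).take (k + 1) = lst.drop 1 := List.take_of_length_le (by omega)
        rw [this]
        -- but LHS of goal must also equal drop1 ++ [getD]; contradiction? no: getD is default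
        -- this branch is unreachable in our use (k + 1 < lst.length when invoked with k+1 < n)
        exact absurd hk (by omega)
    rw [htake]; simp

/-- Apply the invariant at `k = n - 1` and do the final `lst[-1] = v` assignment. -/
lemma pvShift_set_last (lst : List (List Int)) (v : List Int) (h : 1 ≤ lst.length) :
    (((List.range (lst.length - 1)).foldl pvShiftStep lst).set
        (((List.range (lst.length - 1)).foldl pvShiftStep lst).length - 1) v)
      = lst.drop 1 ++ [v] := by
  have hinv := pvShift_inv lst (lst.length - 1) (by omega)
  rw [hinv]
  have htake : (lst.drop 1).take (lst.length - 1) = lst.drop 1 :=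
    List.take_of_length_le (by simp)
  rw [htake]
  have hd : (lst.drop (lst.length - 1)).length = 1 := by simp; omega
  obtain ⟨c, hc⟩ : ∃ c, lst.drop (lst.length - 1) = [c] := by
    rcases e : lst.drop (lst.length - 1) with _ | ⟨c, rest⟩
    · rw [e] at hd; simp at hd
    · rw [e] at hd; simp at hd
      exact ⟨c, by rw [hd]⟩
  rw [hc]
  have hlen : (lst.drop 1 ++ [c]).length - 1 = (lst.drop 1).length := by simp
  rw [hlen, List.set_append_right _ _ (le_refl _)]
  simp

-- ===== VERDICT (by name: the statement is the Claim_ definition above) =====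
theorem update_list_spec : Claim_equal_update_list := by
  intro lst new_x new_y _
  unfold Spec_update_list update_list update_list_alt
  by_cases h : lst.length < 7
  · -- A appends; B appends and the trim test (length + 1 > 7) fails
    simp only [if_pos h]
    have hB : ¬ (lst ++ [[new_x, new_y]]).length > 7 := by simp; omega
    rw [if_neg hB]
  · -- A shifts left then overwrites the last slot; B appends then drops the head
    simp only [if_neg h]
    rw [pvShift_range, pvShift_set_last lst [new_x, new_y] (by omega)]
    have hB : (lst ++ [[new_x, new_y]]).length > 7 := by simp; omega
    rw [if_pos hB, List.drop_append_of_le_length (by omega : 1 ≤ lst.length)]
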